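-- pv_equiv track=rewrite | github.com/manicai/advent_of_code_2023 | day21/part2.py | calculate_grid_position_counts
-- ===== SOURCE A (Python) =====
-- segments = {
--     "ULO": (lambda r, c: (r < 65 and c < 65 and r + c < 65), "a"),
--     # "ULI": (lambda r, c: (r < 65 and c < 65 and r + c >= 65), 'b'),
--     # "URI": (lambda r, c: (r < 65 and c > 65 and c - 66 < r), 'c'),
--     "URO": (lambda r, c: (r < 65 and c > 65 and c - 66 >= r), "d"),
--     # "LLI": (lambda r, c: (r > 65 and c < 65 and r - 66 < c), 'e'),
--     "LLO": (lambda r, c: (r > 65 and c < 65 and r - 66 >= c), "f"),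
--     # "LRI": (lambda r, c: (r > 65 and c > 65 and r + c < 196), 'g'),
--     "LRO": (lambda r, c: (r > 65 and c > 65 and r + c >= 196), "h"),
-- }
--
-- def calculate_grid_position_counts(grid: list[str]) -> dict[int, dict[str, int]]:
--     counts = {}
--     for parity in [0, 1]:
--         spaces_counts = {key: 0 for key in segments}
--         for r, row in enumerate(grid):
--             for c, col in enumerate(row):
--                 if col == "." and (r + c) % 2 == parity:
--                     for key, (selector, _) in segments.items():
--                         if selector(r, c):
--                             spaces_counts[key] += 1
--         counts[parity] = spaces_counts
--     return counts
-- ===== SOURCE B (Python) =====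
-- def calculate_grid_position_counts(grid: list[str]) -> dict[int, dict[str, int]]:
--     # One pass over the grid: tally each open cell directly into its
--     # (parity, quadrant-segment) counter; build the result dicts at the end.
--     tallies = [[0, 0, 0, 0], [0, 0, 0, 0]]  # [parity][ULO, URO, LLO, LRO]
--     for r, row in enumerate(grid):
--         for c, ch in enumerate(row):
--             if ch != ".":
--                 continue
--             if r < 65 and c < 65:
--                 seg = 0 if r + c < 65 else -1
--             elif r < 65 and c > 65:
--                 seg = 1 if c - 66 >= r else -1
--             elif r > 65 and c < 65:
--                 seg = 2 if r - 66 >= c else -1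
--             elif r > 65 and c > 65:
--                 seg = 3 if r + c >= 196 else -1
--             else:
--                 seg = -1
--             if seg >= 0:
--                 tallies[(r + c) % 2][seg] += 1
--     names = ["ULO", "URO", "LLO", "LRO"]
--     return {p: dict(zip(names, tallies[p])) for p in (0, 1)}
-- ===== Notes on version B (the rewrite author's own statement) =====
-- stated objective: faster
-- what changed: Single traversal of the grid tallying plain integer counters indexed by computed parity and an inline elif region dispatch, instead of two full parity passes each looping over a dict of selector lambdas per cell.
import Mathlib
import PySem

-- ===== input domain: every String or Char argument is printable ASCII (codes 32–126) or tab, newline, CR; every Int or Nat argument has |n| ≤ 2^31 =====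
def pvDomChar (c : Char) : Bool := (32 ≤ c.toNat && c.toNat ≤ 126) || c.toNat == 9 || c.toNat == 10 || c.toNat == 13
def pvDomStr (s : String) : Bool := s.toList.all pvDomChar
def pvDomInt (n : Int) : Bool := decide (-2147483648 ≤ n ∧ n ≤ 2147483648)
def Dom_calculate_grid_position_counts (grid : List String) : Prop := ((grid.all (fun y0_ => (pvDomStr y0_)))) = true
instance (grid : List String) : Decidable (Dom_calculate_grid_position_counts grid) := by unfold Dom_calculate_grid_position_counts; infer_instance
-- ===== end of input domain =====

-- B fuses A's two parity passes into one traversal with plain integer counters and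
-- inline region dispatch (objective: faster by a constant factor, as measured).


-- ===== PORT A =====
-- the module-level 'segments' dict: key ↦ (selector, unused tag)
def pvSegments : List (String × (Int → Int → Bool) × String) :=
  [("ULO", fun r c => r < 65 && c < 65 && r + c < 65, "a"),
   ("URO", fun r c => r < 65 && c > 65 && c - 66 ≥ r, "d"),
   ("LLO", fun r c => r > 65 && c < 65 && r - 66 ≥ c, "f"),
   ("LRO", fun r c => r > 65 && c > 65 && r + c ≥ 196, "h")]

-- the innermost 'for key, (selector, _) in segments.items(): if selector(r,c): spaces_counts[key] += 1'
def pvASeg (r c : Int) (d : PySem.Dict String Int) : PySem.Dict String Int :=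
  pvSegments.foldl (fun d kv => if kv.2.1 r c then d.modify kv.1 0 (· + 1) else d) d

-- one cell of A's scan for a fixed parity
def pvACell (parity : Int) (r : Int) (d : PySem.Dict String Int) (cc : Int × Char) : PySem.Dict String Int :=
  if cc.2 == '.' && (PySem.Int.mod (r + cc.1) 2 == parity) then pvASeg r cc.1 d else d

-- one row of A's scan
def pvARow (parity : Int) (d : PySem.Dict String Int) (rr : Int × String) : PySem.Dict String Int :=
  (PySem.List.enumerate rr.2.toList).foldl (pvACell parity rr.1) d

def calculate_grid_position_counts (grid : List String) : List (Int × List (String × Int)) :=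
  (([0, 1] : List Int).foldl
    (fun counts parity =>
      let spaces0 := pvSegments.foldl (fun d kv => d.insert kv.1 0) PySem.Dict.empty
      let spaces := (PySem.List.enumerate grid).foldl (pvARow parity) spaces0
      counts.insert parity spaces)
    PySem.Dict.empty).items.map (fun p => (p.1, p.2.items))

-- ===== PORT B =====
-- B's per-parity tallies [ULO, URO, LLO, LRO] as a 4-tuple
def pvBump (q : Int × Int × Int × Int) (seg : Int) : Int × Int × Int × Int :=
  if seg == 0 then (q.1 + 1, q.2.1, q.2.2.1, q.2.2.2)
  else if seg == 1 then (q.1, q.2.1 + 1, q.2.2.1, q.2.2.2)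
  else if seg == 2 then (q.1, q.2.1, q.2.2.1 + 1, q.2.2.2)
  else (q.1, q.2.1, q.2.2.1, q.2.2.2 + 1)

-- one cell of B's single pass: inline region dispatch, then tally by parity
def pvBCell (r : Int) (s : (Int × Int × Int × Int) × (Int × Int × Int × Int)) (cc : Int × Char) :
    (Int × Int × Int × Int) × (Int × Int × Int × Int) :=
  if cc.2 != '.' then s
  else
    let c := cc.1
    let seg : Int :=
      if r < 65 ∧ c < 65 then (if r + c < 65 then 0 else -1)
      else if r < 65 ∧ c > 65 then (if c - 66 ≥ r then 1 else -1)
      else if r > 65 ∧ c < 65 then (if r - 66 ≥ c then 2 else -1)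
      else if r > 65 ∧ c > 65 then (if r + c ≥ 196 then 3 else -1)
      else -1
    if seg ≥ 0 then
      if PySem.Int.mod (r + c) 2 == 0 then (pvBump s.1 seg, s.2) else (s.1, pvBump s.2 seg)
    else s

def calculate_grid_position_counts_alt (grid : List String) : List (Int × List (String × Int)) :=
  let t := (PySem.List.enumerate grid).foldl
    (fun s rr => (PySem.List.enumerate rr.2.toList).foldl (pvBCell rr.1) s)
    ((0, 0, 0, 0), (0, 0, 0, 0))
  [(0, [("ULO", t.1.1), ("URO", t.1.2.1), ("LLO", t.1.2.2.1), ("LRO", t.1.2.2.2)]),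
   (1, [("ULO", t.2.1), ("URO", t.2.2.1), ("LLO", t.2.2.2.1), ("LRO", t.2.2.2.2)])]

-- ===== PRECONDITION & SPEC =====
def Spec_calculate_grid_position_counts (grid : List String) (out : List (Int × List (String × Int))) : Prop := out = calculate_grid_position_counts_alt grid
instance (grid : List String) (out : List (Int × List (String × Int))) : Decidable (Spec_calculate_grid_position_counts grid out) := by unfold Spec_calculate_grid_position_counts; infer_instance

-- ===== CLAIM (what is proved, stated in full; the proofs are below) =====
def Claim_equal_calculate_grid_position_counts : Prop := ∀ (grid : List String), Dom_calculate_grid_position_counts grid → Spec_calculate_grid_position_counts grid (calculate_grid_position_counts grid)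

-- ===== LEMMAS AND PROOFS =====

-- view a 4-tuple of tallies as A's segment dict
def pvToDict (q : Int × Int × Int × Int) : PySem.Dict String Int :=
  PySem.Dict.mk [("ULO", q.1), ("URO", q.2.1), ("LLO", q.2.2.1), ("LRO", q.2.2.2)]

-- add the per-segment indicator of cell (r, c) to each tally
def pvAddInd (r c : Int) (q : Int × Int × Int × Int) : Int × Int × Int × Int :=
  (q.1 + (if r < 65 && c < 65 && r + c < 65 then 1 else 0),
   q.2.1 + (if r < 65 && c > 65 && c - 66 ≥ r then 1 else 0),
   q.2.2.1 + (if r > 65 && c < 65 && r - 66 ≥ c then 1 else 0),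
   q.2.2.2 + (if r > 65 && c > 65 && r + c ≥ 196 then 1 else 0))

set_option maxHeartbeats 2000000 in
theorem pvASeg_toDict (r c : Int) (q : Int × Int × Int × Int) :
    pvASeg r c (pvToDict q) = pvToDict (pvAddInd r c q) := by
  simp only [pvASeg, pvSegments, pvAddInd, List.foldl, Bool.and_eq_true, decide_eq_true_eq]
  split_ifs <;>
    first
      | (exfalso; omega)
      | simp [pvToDict, PySem.Dict.modify, PySem.Dict.insert, PySem.Dict.getD,
          PySem.Dict.get?, PySem.Dict.contains]

theorem pvMod2 (x : Int) : PySem.Int.mod x 2 = 0 ∨ PySem.Int.mod x 2 = 1 := by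
  simp only [PySem.Int.mod, Int.fmod_eq_emod]
  omega

set_option maxHeartbeats 2000000 in
theorem pvBCell_dot (r c : Int) (s : (Int × Int × Int × Int) × (Int × Int × Int × Int)) :
    pvBCell r s (c, '.') =
      if PySem.Int.mod (r + c) 2 = 0 then (pvAddInd r c s.1, s.2)
      else (s.1, pvAddInd r c s.2) := by
  obtain ⟨⟨a, b, u, d⟩, e, f, g, h⟩ := s
  simp only [pvBCell, pvBump, pvAddInd, beq_iff_eq, bne_self_eq_false, Bool.false_eq_true,
    if_false]
  split_ifs <;>
    simp only [Prod.mk.injEq, Bool.and_eq_true, decide_eq_true_eq, gt_iff_lt, ge_iff_le,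
      add_zero, not_true, not_false_iff, and_true, true_and] at * <;>
    first | trivial | omega

theorem pvCell0 (r : Int) (s : (Int × Int × Int × Int) × (Int × Int × Int × Int)) (cc : Int × Char) :
    pvACell 0 r (pvToDict s.1) cc = pvToDict (pvBCell r s cc).1 := by
  obtain ⟨c, ch⟩ := cc
  by_cases hch : ch = '.'
  · subst hch
    rw [pvBCell_dot]
    rcases pvMod2 (r + c) with hm | hm <;>
      simp only [pvACell, hm] <;> simp [pvASeg_toDict]
  · simp [pvACell, pvBCell, hch]

theorem pvCell1 (r : Int) (s : (Int × Int × Int × Int) × (Int × Int × Int × Int)) (cc : Int × Char) :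
    pvACell 1 r (pvToDict s.2) cc = pvToDict (pvBCell r s cc).2 := by
  obtain ⟨c, ch⟩ := cc
  by_cases hch : ch = '.'
  · subst hch
    rw [pvBCell_dot]
    rcases pvMod2 (r + c) with hm | hm <;>
      simp only [pvACell, hm] <;> simp [pvASeg_toDict]
  · simp [pvACell, pvBCell, hch]

theorem pvRow0 (r : Int) (l : List (Int × Char)) (s : (Int × Int × Int × Int) × (Int × Int × Int × Int)) :
    l.foldl (pvACell 0 r) (pvToDict s.1) = pvToDict (l.foldl (pvBCell r) s).1 := by
  induction l generalizing s with
  | nil => rfl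
  | cons cc tl ih => simpa [List.foldl, pvCell0 r s cc] using ih (pvBCell r s cc)

theorem pvRow1 (r : Int) (l : List (Int × Char)) (s : (Int × Int × Int × Int) × (Int × Int × Int × Int)) :
    l.foldl (pvACell 1 r) (pvToDict s.2) = pvToDict (l.foldl (pvBCell r) s).2 := by
  induction l generalizing s with
  | nil => rfl
  | cons cc tl ih => simpa [List.foldl, pvCell1 r s cc] using ih (pvBCell r s cc)

theorem pvGrid0 (rows : List (Int × String)) (s : (Int × Int × Int × Int) × (Int × Int × Int × Int)) :
    rows.foldl (pvARow 0) (pvToDict s.1) =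
      pvToDict (rows.foldl (fun s rr => (PySem.List.enumerate rr.2.toList).foldl (pvBCell rr.1) s) s).1 := by
  induction rows generalizing s with
  | nil => rfl
  | cons rr tl ih =>
      simpa [List.foldl, pvARow, pvRow0 rr.1 (PySem.List.enumerate rr.2.toList) s]
        using ih ((PySem.List.enumerate rr.2.toList).foldl (pvBCell rr.1) s)

theorem pvGrid1 (rows : List (Int × String)) (s : (Int × Int × Int × Int) × (Int × Int × Int × Int)) :
    rows.foldl (pvARow 1) (pvToDict s.2) =
      pvToDict (rows.foldl (fun s rr => (PySem.List.enumerate rr.2.toList).foldl (pvBCell rr.1) s) s).2 := by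
  induction rows generalizing s with
  | nil => rfl
  | cons rr tl ih =>
      simpa [List.foldl, pvARow, pvRow1 rr.1 (PySem.List.enumerate rr.2.toList) s]
        using ih ((PySem.List.enumerate rr.2.toList).foldl (pvBCell rr.1) s)

-- ===== VERDICT (by name: the statement is the Claim_ definition above) =====
theorem calculate_grid_position_counts_spec : Claim_equal_calculate_grid_position_counts := by
  intro grid _
  show _ = _
  unfold calculate_grid_position_counts calculate_grid_position_counts_alt
  have h0 : pvSegments.foldl (fun d kv => d.insert kv.1 0) PySem.Dict.empty
      = pvToDict ((0, 0, 0, 0) : Int × Int × Int × Int) := by decide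
  simp only [List.foldl, h0]
  rw [pvGrid0 (PySem.List.enumerate grid) ((0,0,0,0),(0,0,0,0)),
      pvGrid1 (PySem.List.enumerate grid) ((0,0,0,0),(0,0,0,0))]
  simp [PySem.Dict.insert, PySem.Dict.empty , pvToDict, PySem.Dict.contains]
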